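-- pv_equiv track=rewrite | github.com/Lourdvic/Phantom_opera | random_fantom.py | select_position
-- ===== SOURCE A (Python) =====
-- def select_position(empty_room, data):
--     i = 0
--     while i < len(data):
--         x = 0
--         while x < len(empty_room):
--             if data[i] == empty_room[x]:
--                 return i
--             x += 1
--         i += 1
--     return 0
-- ===== SOURCE B (Python) =====
-- def select_position(empty_room, data):
--     first = {}
--     for i, v in enumerate(data):
--         first.setdefault(v, i)
--     return min((first[v] for v in empty_room if v in first), default=0)
-- ===== Notes on version B (the rewrite author's own statement) =====
-- stated objective: alternative
-- what changed: Builds a first-occurrence index of data once, then scans empty_room and returns the minimum mapped index (default 0), instead of scanning data with an inner scan of empty_room.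
import Mathlib
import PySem

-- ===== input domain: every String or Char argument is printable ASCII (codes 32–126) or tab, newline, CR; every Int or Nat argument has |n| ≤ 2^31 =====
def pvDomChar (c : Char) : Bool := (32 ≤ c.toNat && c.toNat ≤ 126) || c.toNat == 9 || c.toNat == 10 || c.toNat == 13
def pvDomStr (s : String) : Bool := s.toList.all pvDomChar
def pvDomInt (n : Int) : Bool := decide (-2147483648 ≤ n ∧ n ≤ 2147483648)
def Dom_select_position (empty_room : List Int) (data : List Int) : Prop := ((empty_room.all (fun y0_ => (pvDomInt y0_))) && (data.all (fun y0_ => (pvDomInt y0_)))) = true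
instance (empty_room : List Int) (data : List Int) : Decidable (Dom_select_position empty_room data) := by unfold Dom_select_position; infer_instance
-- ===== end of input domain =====

-- B replaces A's nested scan (data outer, empty_room inner) by a first-occurrence
-- index of data built once, then a minimum over empty_room lookups (alternative, same cost class in practice).

-- ===== PORT A =====
-- inner 'while x < len(empty_room)' loop: does data[i] occur in empty_room?
def pvInnerA (d : Int) : List Int → Bool
  | [] => false
  | e :: rest => if d == e then true else pvInnerA d rest

-- outer 'while i < len(data)' loop, i carried as the running index
def pvOuterA (empty_room : List Int) (i : Int) : List Int → Int
  | [] => 0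
  | d :: rest => if pvInnerA d empty_room then i else pvOuterA empty_room (i + 1) rest

def select_position (empty_room : List Int) (data : List Int) : Int :=
  pvOuterA empty_room 0 data

-- ===== PORT B =====
-- 'for i, v in enumerate(data): first.setdefault(v, i)'
def pvBuildFirst (d : PySem.Dict Int Int) (i : Int) : List Int → PySem.Dict Int Int
  | [] => d
  | v :: rest => pvBuildFirst (d.setdefault v i) (i + 1) rest

-- 'min((first[v] for v in empty_room if v in first), default=0)': running optional minimum
def pvMinScan (first : PySem.Dict Int Int) (acc : Option Int) : List Int → Option Int
  | [] => acc
  | v :: rest =>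
    match first.get? v with
    | some i => pvMinScan first (some (match acc with | none => i | some a => min a i)) rest
    | none => pvMinScan first acc rest

def select_position_alt (empty_room : List Int) (data : List Int) : Int :=
  (pvMinScan (pvBuildFirst PySem.Dict.empty 0 data) none empty_room).getD 0

-- ===== PRECONDITION & SPEC =====
def Spec_select_position (empty_room : List Int) (data : List Int) (out : Int) : Prop := out = select_position_alt empty_room data
instance (empty_room : List Int) (data : List Int) (out : Int) : Decidable (Spec_select_position empty_room data out) := by unfold Spec_select_position; infer_instance

-- ===== CLAIM (what is proved, stated in full; the proofs are below) =====
def Claim_equal_select_position : Prop := ∀ (empty_room : List Int) (data : List Int), Dom_select_position empty_room data → Spec_select_position empty_room data (select_position empty_room data)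

-- ===== LEMMAS AND PROOFS =====

theorem pvInnerA_eq (d : Int) (er : List Int) : pvInnerA d er = decide (d ∈ er) := by
  induction er with
  | nil => simp [pvInnerA]
  | cons e rest ih => by_cases h : d = e <;> simp [pvInnerA, h, ih]

theorem pvOuterA_eq (er : List Int) (data : List Int) (i : Int) :
    pvOuterA er i data =
      match data.findIdx? (fun v => decide (v ∈ er)) with
      | some k => i + (k : Int)
      | none => 0 := by
  induction data generalizing i with
  | nil => simp [pvOuterA]
  | cons d rest ih =>
    rw [pvOuterA, pvInnerA_eq, List.findIdx?_cons]
    by_cases h : d ∈ er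
    · simp [h]
    · rw [ih]
      cases hf : rest.findIdx? (fun v => decide (v ∈ er)) with
      | none => simp [h]
      | some k => simp [h]; ring

theorem pvSetdefault_eq (d : PySem.Dict Int Int) (k : Int) (v : Int) :
    d.setdefault k v = if d.contains k = true then d else d.insert k v := by
  by_cases h : d.contains k = true
  · simp [PySem.Dict.setdefault, h]
  · have h' : d.contains k = false := by simpa using h
    rw [if_neg h]
    apply PySem.Dict.ext
    rw [PySem.Dict.items_insert_of_not_contains d v h']
    simp [PySem.Dict.setdefault, h']

theorem pvBuildFirst_get (data : List Int) (d : PySem.Dict Int Int) (i : Int) (v : Int) :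
    (pvBuildFirst d i data).get? v =
      (d.get? v).or ((data.findIdx? (fun x => x == v)).map (fun k : Nat => i + (k : Int))) := by
  induction data generalizing d i with
  | nil => simp [pvBuildFirst]
  | cons a rest ih =>
    rw [pvBuildFirst, ih, pvSetdefault_eq, List.findIdx?_cons]
    by_cases hc : d.contains a = true
    · rw [if_pos hc]
      by_cases hav : a = v
      · subst hav
        have : (d.get? a).isSome := by
          rw [← PySem.Dict.contains_eq_isSome_get?]; exact hc
        obtain ⟨w, hw⟩ := Option.isSome_iff_exists.mp this
        simp [hw, Option.or]
      · have : (a == v) = false := by simpa using hav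
        rw [this]
        simp [Option.map_map]
        have hfun : ((fun k : Nat => i + (k : Int)) ∘ fun n : Nat => n + 1) = (fun k : Nat => i + 1 + (k : Int)) := by
          funext k
          simp only [Function.comp_apply]
          push_cast
          ring
        rw [hfun]
    · rw [if_neg hc]
      rw [PySem.Dict.get?_insert]
      by_cases hva : v = a
      · subst hva
        have hg : d.get? v = none := by
          rw [PySem.Dict.get?_eq_none_iff_contains]; simpa using hc
        simp [hg, Option.or]
      · have hav' : (a == v) = false := by simpa using (Ne.symm hva)
        rw [if_neg hva, hav']
        simp [Option.map_map]
        have hfun : ((fun k : Nat => i + (k : Int)) ∘ fun n : Nat => n + 1) = (fun k : Nat => i + 1 + (k : Int)) := by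
          funext k
          simp only [Function.comp_apply]
          push_cast
          ring
        rw [hfun]

theorem pvMinScan_none (f : PySem.Dict Int Int) (er : List Int) (acc : Option Int) :
    pvMinScan f acc er = none ↔ acc = none ∧ ∀ v ∈ er, f.get? v = none := by
  induction er generalizing acc with
  | nil => simp [pvMinScan]
  | cons v rest ih =>
    rw [pvMinScan]
    cases h : f.get? v with
    | none => rw [ih]; simp [h]
    | some i => rw [ih]; simp [h]

theorem pvMinScan_le (f : PySem.Dict Int Int) (er : List Int) (acc : Option Int) (r : Int)
    (h : pvMinScan f acc er = some r) :
    (∀ a, acc = some a → r ≤ a) ∧ (∀ v ∈ er, ∀ m, f.get? v = some m → r ≤ m) := by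
  induction er generalizing acc with
  | nil =>
    simp only [pvMinScan] at h
    subst h
    exact ⟨fun a ha => by simp_all, by simp⟩
  | cons v rest ih =>
    rw [pvMinScan] at h
    cases hv : f.get? v with
    | none =>
      rw [hv] at h
      obtain ⟨h1, h2⟩ := ih _ h
      refine ⟨h1, fun w hw m hm => ?_⟩
      rcases List.mem_cons.mp hw with rfl | hw'
      · rw [hv] at hm; cases hm
      · exact h2 w hw' m hm
    | some i =>
      rw [hv] at h
      obtain ⟨h1, h2⟩ := ih _ h
      cases acc with
      | none =>
        have hri : r ≤ i := h1 _ rfl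
        refine ⟨fun a ha => ?_, fun w hw m hm => ?_⟩
        · cases ha
        · rcases List.mem_cons.mp hw with rfl | hw'
          · rw [hv] at hm; injection hm with hm; omega
          · exact h2 w hw' m hm
      | some a =>
        have hmn : r ≤ min a i := h1 _ rfl
        have hri : r ≤ i := le_trans hmn (min_le_right a i)
        refine ⟨fun b hb => ?_, fun w hw m hm => ?_⟩
        · injection hb with hb
          exact hb ▸ le_trans hmn (min_le_left a i)
        · rcases List.mem_cons.mp hw with rfl | hw'
          · rw [hv] at hm; injection hm with hm; omega
          · exact h2 w hw' m hm

theorem pvMinScan_attained (f : PySem.Dict Int Int) (er : List Int) (acc : Option Int) (r : Int)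
    (h : pvMinScan f acc er = some r) :
    acc = some r ∨ ∃ v ∈ er, f.get? v = some r := by
  induction er generalizing acc with
  | nil => simp only [pvMinScan] at h; exact Or.inl h
  | cons v rest ih =>
    rw [pvMinScan] at h
    cases hv : f.get? v with
    | none =>
      rw [hv] at h
      rcases ih _ h with ha | ⟨w, hw, hg⟩
      · exact Or.inl ha
      · exact Or.inr ⟨w, List.mem_cons_of_mem _ hw, hg⟩
    | some i =>
      rw [hv] at h
      rcases ih _ h with ha | ⟨w, hw, hg⟩
      · cases acc with
        | none =>
          injection ha with ha
          have ha' : i = r := ha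
          exact Or.inr ⟨v, List.mem_cons_self, by rw [hv, ha']⟩
        | some a =>
          injection ha with ha
          have ha' : min a i = r := ha
          rcases min_choice a i with hm | hm
          · exact Or.inl (by rw [← ha', hm])
          · exact Or.inr ⟨v, List.mem_cons_self, by rw [hv, ← ha', hm]⟩
      · exact Or.inr ⟨w, List.mem_cons_of_mem _ hw, hg⟩

-- ===== VERDICT (by name: the statement is the Claim_ definition above) =====
theorem select_position_spec : Claim_equal_select_position := by
  intro er data _
  show select_position er data = select_position_alt er data
  rw [select_position, select_position_alt, pvOuterA_eq]
  have hF : ∀ v, (pvBuildFirst PySem.Dict.empty 0 data).get? v =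
      (data.findIdx? (fun x => x == v)).map (fun k : Nat => (k : Int)) := by
    intro v
    rw [pvBuildFirst_get]
    simp [PySem.Dict.get?_empty, Option.or]
  cases hfi : data.findIdx? (fun v => decide (v ∈ er)) with
  | none =>
    have hall : ∀ x ∈ data, decide (x ∈ er) = false := List.findIdx?_eq_none_iff.mp hfi
    have hn : pvMinScan (pvBuildFirst PySem.Dict.empty 0 data) none er = none := by
      rw [pvMinScan_none]
      refine ⟨rfl, fun v hv => ?_⟩
      rw [hF]
      have : data.findIdx? (fun x => x == v) = none := by
        rw [List.findIdx?_eq_none_iff]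
        intro x hx
        by_contra hxv
        have hxv' : x = v := by simpa using hxv
        subst hxv'
        have := hall x hx
        simp [hv] at this
      rw [this]; rfl
    rw [hn]; rfl
  | some k =>
    obtain ⟨hk, hfx⟩ := List.findIdx?_eq_some_iff_findIdx_eq.mp hfi
    have hpk : decide (data[k] ∈ er) = true := by
      have := @List.findIdx_getElem _ (fun v => decide (v ∈ er)) data (by rw [hfx]; exact hk)
      simpa [hfx] using this
    have hv0er : data[k] ∈ er := by simpa using hpk
    have hmin : ∀ j (hj : j < k), decide (data[j] ∈ er) = false := by
      intro j hj
      exact List.not_of_lt_findIdx (by rw [hfx]; exact hj)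
    -- the first-occurrence index of data[k] is exactly k
    have hvk : data.findIdx? (fun x => x == data[k]) = some k := by
      rw [List.findIdx?_eq_some_iff_findIdx_eq]
      refine ⟨hk, (List.findIdx_eq hk).mpr ⟨by simp, fun j hj => ?_⟩⟩
      by_contra hne
      have hje : data[j] = data[k] := by simpa using hne
      have := hmin j hj
      rw [hje] at this
      rw [this] at hpk
      cases hpk
    have hg0 : (pvBuildFirst PySem.Dict.empty 0 data).get? data[k] = some (k : Int) := by
      rw [hF, hvk]; rfl
    cases hr : pvMinScan (pvBuildFirst PySem.Dict.empty 0 data) none er with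
    | none =>
      obtain ⟨-, h2⟩ := (pvMinScan_none _ _ _).mp hr
      rw [h2 data[k] hv0er] at hg0
      cases hg0
    | some r =>
      have hle : r ≤ (k : Int) :=
        (pvMinScan_le _ _ _ _ hr).2 data[k] hv0er (k : Int) hg0
      have hge : (k : Int) ≤ r := by
        rcases pvMinScan_attained _ _ _ _ hr with ha | ⟨v, hver, hg⟩
        · cases ha
        · rw [hF] at hg
          cases hm : data.findIdx? (fun x => x == v) with
          | none => rw [hm] at hg; cases hg
          | some m =>
            rw [hm] at hg
            injection hg with hg
            have hg2 : (m : Int) = r := hg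
            obtain ⟨hmlen, hmfx⟩ := List.findIdx?_eq_some_iff_findIdx_eq.mp hm
            have hdm : data[m] = v := by
              have := @List.findIdx_getElem _ (fun x => x == v) data (by rw [hmfx]; exact hmlen)
              simpa [hmfx] using this
            have hpm : decide (data[m] ∈ er) = true := by rw [hdm]; simpa using hver
            have : ¬ m < k := by
              intro hmk
              rw [hmin m hmk] at hpm
              cases hpm
            omega
      have : r = (k : Int) := le_antisymm hle hge
      rw [this]
      simp
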